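-- pv_equiv track=rewrite | github.com/6210qwe/leetcode_py | leetcode_solutions/by_id/q3808.py | longest_palindrome_after_substring_concatenation
-- ===== SOURCE A (Python) =====
-- def longest_palindrome_after_substring_concatenation(s: str, t: str) -> int:
--     """
--     函数式接口 - 实现
--     """
--     n, m = len(s), len(t)
--     dp = [[0] * (m + 1) for _ in range(n + 1)]
--
--     # 初始化边界条件
--     for i in range(n):
--         dp[i][m] = 1
--     for j in range(m):
--         dp[n][j] = 1
--
--     # 填充 dp 数组
--     for i in range(n - 1, -1, -1):
--         for j in range(m - 1, -1, -1):
--             if s[i] == t[j]: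
--                 dp[i][j] = dp[i + 1][j + 1] + 2
--             else:
--                 dp[i][j] = max(dp[i + 1][j], dp[i][j + 1])
--
--     return dp[0][0]
-- ===== SOURCE B (Python) =====
-- def longest_palindrome_after_substring_concatenation(s: str, t: str) -> int:
--     # Top-down memoized recursion over (i, j) instead of a bottom-up table.
--     n, m = len(s), len(t)
--     memo = {}
--
--     def f(i, j):
--         if i == n and j == m:
--             return 0
--         if i == n or j == m:
--             return 1
--         v = memo.get((i, j))
--         if v is None:
--             if s[i] == t[j]:
--                 v = f(i + 1, j + 1) + 2
--             else:
--                 v = max(f(i + 1, j), f(i, j + 1))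
--             memo[(i, j)] = v
--         return v
--
--     return f(0, 0)
-- ===== Notes on version B (the rewrite author's own statement) =====
-- stated objective: alternative
-- what changed: Replaces A's bottom-up (n+1)x(m+1) table fill with separate boundary-init loops by a top-down recursive descent over index pairs (i,j) with a dict memo, computing values on demand.
import Mathlib
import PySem

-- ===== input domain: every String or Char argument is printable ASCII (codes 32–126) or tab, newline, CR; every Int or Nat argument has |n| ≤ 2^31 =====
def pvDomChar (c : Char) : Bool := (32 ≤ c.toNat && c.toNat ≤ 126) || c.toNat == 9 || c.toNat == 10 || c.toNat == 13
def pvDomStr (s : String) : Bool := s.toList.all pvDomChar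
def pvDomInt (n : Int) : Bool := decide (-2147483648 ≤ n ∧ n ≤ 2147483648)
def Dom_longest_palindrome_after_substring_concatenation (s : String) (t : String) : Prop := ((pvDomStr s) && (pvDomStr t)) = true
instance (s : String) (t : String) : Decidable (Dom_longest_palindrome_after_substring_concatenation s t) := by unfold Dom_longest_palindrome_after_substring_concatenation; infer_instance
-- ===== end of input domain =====

-- B replaces A's bottom-up (n+1)×(m+1) table fill (with separate boundary-init loops) by a
-- top-down recursive descent over index pairs (i, j) with a dict memo; same values, same cost.

-- ===== PORT A =====
-- dp[i][j] read/write on the 2-D list (all A's accesses are in range)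
def get2 (dp : List (List Int)) (i j : Nat) : Int := (dp.getD i []).getD j 0
def set2 (dp : List (List Int)) (i j : Nat) (v : Int) : List (List Int) :=
  dp.set i ((dp.getD i []).set j v)

-- body of A's inner loop over j
def innerStepA (sc tc : List Char) (i : Nat) (dp : List (List Int)) (j : Nat) : List (List Int) :=
  set2 dp i j (if sc.getD i ' ' = tc.getD j ' '
    then get2 dp (i+1) (j+1) + 2
    else max (get2 dp (i+1) j) (get2 dp i (j+1)))

-- body of A's outer loop over i (range(m-1,-1,-1) = reverse of range(m))
def rowStepA (sc tc : List Char) (dp : List (List Int)) (i : Nat) : List (List Int) :=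
  (List.range tc.length).reverse.foldl (innerStepA sc tc i) dp

def longest_palindrome_after_substring_concatenation (s : String) (t : String) : Int :=
  let sc := s.toList
  let tc := t.toList
  let n := sc.length
  let m := tc.length
  let dp0 : List (List Int) := (List.range (n+1)).map (fun _ => List.replicate (m+1) (0:Int))
  let dp1 := (List.range n).foldl (fun dp i => set2 dp i m 1) dp0
  let dp2 := (List.range m).foldl (fun dp j => set2 dp n j 1) dp1
  let dp3 := (List.range n).reverse.foldl (rowStepA sc tc) dp2
  get2 dp3 0 0

-- ===== PORT B =====
-- Source B's recursive helper f(i, j) with the dict memo threaded through as state.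
-- Python tests i == n / j == m; for the indices the code ever passes (i ≤ n, j ≤ m) the
-- '≤' guards used here are exactly those tests (written with ≤ so the measure decreases).
def goB (sc tc : List Char) (i j : Nat) (memo : PySem.Dict (Nat × Nat) Int) :
    Int × PySem.Dict (Nat × Nat) Int :=
  if sc.length ≤ i ∧ tc.length ≤ j then (0, memo)
  else if sc.length ≤ i ∨ tc.length ≤ j then (1, memo)
  else
    match memo.get? (i, j) with
    | some v => (v, memo)
    | none =>
      if sc.getD i ' ' = tc.getD j ' ' then
        let r := goB sc tc (i+1) (j+1) memo
        (r.1 + 2, r.2.insert (i, j) (r.1 + 2))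
      else
        let r1 := goB sc tc (i+1) j memo
        let r2 := goB sc tc i (j+1) r1.2
        (max r1.1 r2.1, r2.2.insert (i, j) (max r1.1 r2.1))
termination_by (sc.length - i) + (tc.length - j)
decreasing_by all_goals omega

def longest_palindrome_after_substring_concatenation_alt (s : String) (t : String) : Int :=
  (goB s.toList t.toList 0 0 PySem.Dict.empty).1

-- ===== PRECONDITION & SPEC =====
def Spec_longest_palindrome_after_substring_concatenation (s : String) (t : String) (out : Int) : Prop := out = longest_palindrome_after_substring_concatenation_alt s t
instance (s : String) (t : String) (out : Int) : Decidable (Spec_longest_palindrome_after_substring_concatenation s t out) := by unfold Spec_longest_palindrome_after_substring_concatenation; infer_instance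

-- ===== CLAIM (what is proved, stated in full; the proofs are below) =====
def Claim_equal_longest_palindrome_after_substring_concatenation : Prop := ∀ (s : String) (t : String), Dom_longest_palindrome_after_substring_concatenation s t → Spec_longest_palindrome_after_substring_concatenation s t (longest_palindrome_after_substring_concatenation s t)

-- ===== LEMMAS AND PROOFS =====

-- the common recurrence both programs tabulate (proof device only)
def fA (sc tc : List Char) (i j : Nat) : Int :=
  if sc.length ≤ i ∧ tc.length ≤ j then 0
  else if sc.length ≤ i ∨ tc.length ≤ j then 1
  else if sc.getD i ' ' = tc.getD j ' ' then fA sc tc (i+1) (j+1) + 2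
  else max (fA sc tc (i+1) j) (fA sc tc i (j+1))
termination_by (sc.length - i) + (tc.length - j)
decreasing_by all_goals omega

-- shape of the 2-D table
def ShapeT (n m : Nat) (dp : List (List Int)) : Prop :=
  dp.length = n+1 ∧ ∀ k, k < n+1 → (dp.getD k []).length = m+1

-- boundary values left by A's two init loops
def bvalT (n m a b : Nat) : Int :=
  if b = m ∧ a < n then 1 else if a = n ∧ b < m then 1 else 0

-- invariant after A has filled all rows ≥ i0
def InvA (sc tc : List Char) (i0 : Nat) (dp : List (List Int)) : Prop :=
  ShapeT sc.length tc.length dp ∧ ∀ a b, a ≤ sc.length → b ≤ tc.length →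
    get2 dp a b = if i0 ≤ a then fA sc tc a b else bvalT sc.length tc.length a b

-- invariant inside A's row i: cells ≥ j0 of row i are filled
def InnerInvA (sc tc : List Char) (i j0 : Nat) (dp : List (List Int)) : Prop :=
  ShapeT sc.length tc.length dp ∧ ∀ a b, a ≤ sc.length → b ≤ tc.length →
    get2 dp a b = if i < a then fA sc tc a b
      else if a = i ∧ j0 ≤ b then fA sc tc a b else bvalT sc.length tc.length a b

theorem get2_set2 (dp : List (List Int)) (i j : Nat) (v : Int) (a b : Nat)
    (hi : i < dp.length) (hj : j < (dp.getD i []).length) :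
    get2 (set2 dp i j v) a b = if a = i ∧ b = j then v else get2 dp a b := by
  unfold get2 set2
  by_cases hai : a = i
  · subst hai
    rw [List.getD_eq_getElem dp [] hi] at hj
    simp [List.getD, hi]
    by_cases hbj : b = j
    · subst hbj; simp [hj]
    · simp [hbj, List.getElem?_set_ne (by omega : j ≠ b)]
  · simp [List.getD, List.getElem?_set_ne (by omega : i ≠ a), hai]

theorem shape_set2 (n m : Nat) (dp : List (List Int)) (i j : Nat) (v : Int)
    (h : ShapeT n m dp) : ShapeT n m (set2 dp i j v) := by
  obtain ⟨h1, h2⟩ := h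
  refine ⟨by simp [set2, h1], fun k hk => ?_⟩
  by_cases hki : k = i
  · subst hki
    by_cases hik : k < dp.length
    · rw [show (set2 dp k j v).getD k [] = (dp.getD k []).set j v by
        simp [set2, List.getD, hik]]
      simp only [List.length_set]
      exact h2 k hk
    · simp [set2, List.set_eq_of_length_le (by omega)]
      exact h2 k hk
  · simp [set2, List.getD, List.getElem?_set_ne (by omega : i ≠ k)]
    exact h2 k hk

theorem fA_nm (sc tc : List Char) : fA sc tc sc.length tc.length = 0 := by
  rw [fA]; simp

theorem fA_im (sc tc : List Char) (i : Nat) (hi : i < sc.length) :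
    fA sc tc i tc.length = 1 := by
  rw [fA]; simp [Nat.not_le.mpr hi]

theorem fA_nj (sc tc : List Char) (j : Nat) (hj : j < tc.length) :
    fA sc tc sc.length j = 1 := by
  rw [fA]; simp [Nat.not_le.mpr hj]

theorem fA_boundary (sc tc : List Char) (a b : Nat) (ha : a ≤ sc.length) (hb : b ≤ tc.length)
    (h : a = sc.length ∨ b = tc.length) :
    fA sc tc a b = bvalT sc.length tc.length a b := by
  unfold bvalT
  rcases h with h | h
  · subst h
    rcases Nat.lt_or_ge b tc.length with hb' | hb'
    · rw [fA_nj sc tc b hb']; simp [hb']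
    · have : b = tc.length := by omega
      subst this; rw [fA_nm]; simp
  · subst h
    rcases Nat.lt_or_ge a sc.length with ha' | ha'
    · rw [fA_im sc tc a ha']; simp [ha']
    · have : a = sc.length := by omega
      subst this; rw [fA_nm]; simp

theorem fA_step (sc tc : List Char) (i j : Nat) (hi : i < sc.length) (hj : j < tc.length) :
    fA sc tc i j = if sc.getD i ' ' = tc.getD j ' ' then fA sc tc (i+1) (j+1) + 2
      else max (fA sc tc (i+1) j) (fA sc tc i (j+1)) := by
  rw [fA]; simp [Nat.not_le.mpr hi, Nat.not_le.mpr hj]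

theorem innerStepA_inv (sc tc : List Char) (i j : Nat) (dp : List (List Int))
    (hi : i < sc.length) (hj : j < tc.length)
    (h : InnerInvA sc tc i (j+1) dp) :
    InnerInvA sc tc i j (innerStepA sc tc i dp j) := by
  obtain ⟨hsh, hval⟩ := h
  have e1 : get2 dp (i+1) (j+1) = fA sc tc (i+1) (j+1) := by
    rw [hval (i+1) (j+1) (by omega) (by omega)]; simp
  have e2 : get2 dp (i+1) j = fA sc tc (i+1) j := by
    rw [hval (i+1) j (by omega) (by omega)]; simp
  have e3 : get2 dp i (j+1) = fA sc tc i (j+1) := by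
    rw [hval i (j+1) (by omega) (by omega)]; simp
  have hvi : i < dp.length := by rw [hsh.1]; omega
  have hvj : j < (dp.getD i []).length := by rw [hsh.2 i (by omega)]; omega
  refine ⟨shape_set2 _ _ _ _ _ _ hsh, fun a b ha hb => ?_⟩
  unfold innerStepA
  rw [get2_set2 dp i j _ a b hvi hvj]
  by_cases hw : a = i ∧ b = j
  · obtain ⟨hw1, hw2⟩ := hw
    subst hw1; subst hw2
    rw [if_pos ⟨rfl, rfl⟩, e1, e2, e3, ← fA_step sc tc a b hi hj]
    simp
  · rw [if_neg hw, hval a b ha hb]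
    split_ifs <;> first | rfl | omega

theorem innerFoldA_inv (sc tc : List Char) (i : Nat) (hi : i < sc.length) :
    ∀ c, c ≤ tc.length → ∀ dp, InnerInvA sc tc i tc.length dp →
    InnerInvA sc tc i (tc.length - c)
      (((List.range' (tc.length - c) c).reverse).foldl (innerStepA sc tc i) dp) := by
  intro c
  induction c with
  | zero => intro _ dp h; simpa using h
  | succ c ih =>
    intro hc dp h
    have hrange : List.range' (tc.length - (c+1)) (c+1)
        = (tc.length - (c+1)) :: List.range' (tc.length - c) c := by
      rw [List.range'_succ, (by omega : tc.length - (c+1) + 1 = tc.length - c)]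
    rw [hrange, List.reverse_cons, List.foldl_append]
    have h2 := ih (by omega) dp h
    have := innerStepA_inv sc tc i (tc.length - (c+1)) _ hi (by omega)
      (by rw [(by omega : tc.length - (c+1) + 1 = tc.length - c)]; exact h2)
    simpa using this

theorem rowStepA_inv (sc tc : List Char) (i : Nat) (dp : List (List Int))
    (hi : i < sc.length) (h : InvA sc tc (i+1) dp) :
    InvA sc tc i (rowStepA sc tc dp i) := by
  obtain ⟨hsh, hval⟩ := h
  have hstart : InnerInvA sc tc i tc.length dp := by
    refine ⟨hsh, fun a b ha hb => ?_⟩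
    rw [hval a b ha hb]
    by_cases h1 : i < a
    · simp [h1, show i+1 ≤ a from h1]
    · have h1' : ¬ (i+1 ≤ a) := by omega
      simp only [if_neg h1, if_neg h1']
      by_cases h2 : a = i ∧ tc.length ≤ b
      · have hbm : b = tc.length := by omega
        rw [if_pos h2, fA_boundary sc tc a b ha hb (Or.inr hbm)]
      · rw [if_neg h2]
  have hfold := innerFoldA_inv sc tc i hi tc.length le_rfl dp hstart
  rw [Nat.sub_self, ← List.range_eq_range'] at hfold
  obtain ⟨hsh2, hval2⟩ := hfold
  unfold rowStepA
  exact ⟨hsh2, fun a b ha hb => by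
    rw [hval2 a b ha hb]; split_ifs <;> first | rfl | omega⟩

theorem outerFoldA_inv (sc tc : List Char) :
    ∀ c, c ≤ sc.length → ∀ dp, InvA sc tc sc.length dp →
    InvA sc tc (sc.length - c)
      (((List.range' (sc.length - c) c).reverse).foldl (rowStepA sc tc) dp) := by
  intro c
  induction c with
  | zero => intro _ dp h; simpa using h
  | succ c ih =>
    intro hc dp h
    have hrange : List.range' (sc.length - (c+1)) (c+1)
        = (sc.length - (c+1)) :: List.range' (sc.length - c) c := by
      rw [List.range'_succ, (by omega : sc.length - (c+1) + 1 = sc.length - c)]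
    rw [hrange, List.reverse_cons, List.foldl_append]
    have h2 := ih (by omega) dp h
    have := rowStepA_inv sc tc (sc.length - (c+1)) _ (by omega)
      (by rw [(by omega : sc.length - (c+1) + 1 = sc.length - c)]; exact h2)
    simpa using this

theorem dp0_facts (n m : Nat) :
    ShapeT n m ((List.range (n+1)).map (fun _ => List.replicate (m+1) (0:Int)))
    ∧ ∀ a b, get2 ((List.range (n+1)).map (fun _ => List.replicate (m+1) (0:Int))) a b = 0 := by
  constructor
  · refine ⟨by simp, fun k hk => ?_⟩
    simp [List.getD, hk]
  · intro a b
    unfold get2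
    by_cases ha : a < n+1
    · simp [List.getD, ha]
    · simp [List.getD, ha]

theorem dp1_facts (n m : Nat) : ∀ k, k ≤ n →
    ShapeT n m ((List.range k).foldl (fun dp i => set2 dp i m 1)
        ((List.range (n+1)).map (fun _ => List.replicate (m+1) (0:Int))))
    ∧ ∀ a b, get2 ((List.range k).foldl (fun dp i => set2 dp i m 1)
        ((List.range (n+1)).map (fun _ => List.replicate (m+1) (0:Int)))) a b
      = if a < k ∧ b = m then 1 else 0 := by
  intro k
  induction k with
  | zero =>
    intro _
    refine ⟨(dp0_facts n m).1, fun a b => ?_⟩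
    rw [List.range_zero, List.foldl_nil, (dp0_facts n m).2 a b]
    simp
  | succ k ih =>
    intro hk
    obtain ⟨hsh, hval⟩ := ih (by omega)
    rw [show List.range (k+1) = List.range k ++ [k] from List.range_succ,
      List.foldl_append, List.foldl_cons, List.foldl_nil]
    refine ⟨shape_set2 _ _ _ _ _ _ hsh, fun a b => ?_⟩
    rw [get2_set2 _ _ _ _ _ _ (by rw [hsh.1]; omega) (by rw [hsh.2 k (by omega)]; omega),
      hval a b]
    split_ifs <;> first | rfl | omega

theorem dp2_facts (n m : Nat) : ∀ k, k ≤ m →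
    ShapeT n m ((List.range k).foldl (fun dp j => set2 dp n j 1)
        ((List.range n).foldl (fun dp i => set2 dp i m 1)
          ((List.range (n+1)).map (fun _ => List.replicate (m+1) (0:Int)))))
    ∧ ∀ a b, get2 ((List.range k).foldl (fun dp j => set2 dp n j 1)
        ((List.range n).foldl (fun dp i => set2 dp i m 1)
          ((List.range (n+1)).map (fun _ => List.replicate (m+1) (0:Int))))) a b
      = if a < n ∧ b = m then 1 else if a = n ∧ b < k then 1 else 0 := by
  intro k
  induction k with
  | zero =>
    intro _
    refine ⟨(dp1_facts n m n le_rfl).1, fun a b => ?_⟩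
    rw [List.range_zero, List.foldl_nil, (dp1_facts n m n le_rfl).2 a b]
    simp
  | succ k ih =>
    intro hk
    obtain ⟨hsh, hval⟩ := ih (by omega)
    rw [show List.range (k+1) = List.range k ++ [k] from List.range_succ,
      List.foldl_append, List.foldl_cons, List.foldl_nil]
    refine ⟨shape_set2 _ _ _ _ _ _ hsh, fun a b => ?_⟩
    rw [get2_set2 _ _ _ _ _ _ (by rw [hsh.1]; omega) (by rw [hsh.2 n (by omega)]; omega),
      hval a b]
    split_ifs <;> first | rfl | omega

theorem dp2_inv (sc tc : List Char) :
    InvA sc tc sc.length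
      ((List.range tc.length).foldl (fun dp j => set2 dp sc.length j 1)
        ((List.range sc.length).foldl (fun dp i => set2 dp i tc.length 1)
          ((List.range (sc.length+1)).map (fun _ => List.replicate (tc.length+1) (0:Int))))) := by
  obtain ⟨hsh, hval⟩ := dp2_facts sc.length tc.length tc.length le_rfl
  refine ⟨hsh, fun a b ha hb => ?_⟩
  rw [hval a b]
  unfold bvalT
  by_cases h1 : a = sc.length
  · subst h1
    rw [if_pos le_rfl]
    by_cases h2 : b = tc.length
    · subst h2; rw [fA_nm]; simp
    · rw [fA_nj sc tc b (by omega)]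
      simp [(by omega : b < tc.length)]
  · have h1' : ¬ (sc.length ≤ a) := by omega
    rw [if_neg h1']
    split_ifs <;> first | rfl | omega

theorem portA_eq (s t : String) :
    longest_palindrome_after_substring_concatenation s t = fA s.toList t.toList 0 0 := by
  unfold longest_palindrome_after_substring_concatenation
  have hfold := outerFoldA_inv s.toList t.toList s.toList.length le_rfl _
    (dp2_inv s.toList t.toList)
  rw [Nat.sub_self, ← List.range_eq_range'] at hfold
  rw [hfold.2 0 0 (by omega) (by omega)]
  simp

-- B side: every memo entry stores the value of the recurrence
def MemoOK (sc tc : List Char) (memo : PySem.Dict (Nat × Nat) Int) : Prop :=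
  ∀ a b v, memo.get? (a, b) = some v → v = fA sc tc a b

theorem memoOK_insert (sc tc : List Char) (memo : PySem.Dict (Nat × Nat) Int)
    (i j : Nat) (h : MemoOK sc tc memo) :
    MemoOK sc tc (memo.insert (i, j) (fA sc tc i j)) := by
  intro a b v hv
  rw [PySem.Dict.get?_insert] at hv
  by_cases hab : (a, b) = (i, j)
  · rw [if_pos hab] at hv
    cases hab
    exact (Option.some.injEq _ _).mp hv.symm |>.symm ▸ by
      injection hv with h'; omega
  · rw [if_neg hab] at hv
    exact h a b v hv

theorem goB_correct (sc tc : List Char) : ∀ k i j memo,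
    (sc.length - i) + (tc.length - j) ≤ k → MemoOK sc tc memo →
    (goB sc tc i j memo).1 = fA sc tc i j ∧ MemoOK sc tc (goB sc tc i j memo).2 := by
  intro k
  induction k with
  | zero =>
    intro i j memo hk hm
    have hi : sc.length ≤ i := by omega
    have hj : tc.length ≤ j := by omega
    rw [goB, fA]
    simp [hi, hj]
    exact hm
  | succ k ih =>
    intro i j memo hk hm
    rw [goB]
    by_cases h1 : sc.length ≤ i ∧ tc.length ≤ j
    · rw [fA]; simp [h1]; exact hm
    · by_cases h2 : sc.length ≤ i ∨ tc.length ≤ j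
      · rw [fA]; simp [h1, h2]; exact hm
      · have hi : i < sc.length := by omega
        have hj : j < tc.length := by omega
        rw [if_neg h1, if_neg h2]
        cases hget : memo.get? (i, j) with
        | some v =>
          exact ⟨hm i j v hget, hm⟩
        | none =>
          by_cases hc : sc.getD i ' ' = tc.getD j ' '
          · rw [if_pos hc]
            obtain ⟨e1, m1⟩ := ih (i+1) (j+1) memo (by omega) hm
            have hv : (goB sc tc (i+1) (j+1) memo).1 + 2 = fA sc tc i j := by
              rw [e1, fA_step sc tc i j hi hj, if_pos hc]
            refine ⟨hv, ?_⟩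
            simpa [hv] using memoOK_insert sc tc _ i j m1
          · rw [if_neg hc]
            obtain ⟨e1, m1⟩ := ih (i+1) j memo (by omega) hm
            obtain ⟨e2, m2⟩ := ih i (j+1) _ (by omega) m1
            have hv : max (goB sc tc (i+1) j memo).1
                (goB sc tc i (j+1) (goB sc tc (i+1) j memo).2).1 = fA sc tc i j := by
              rw [e1, e2, fA_step sc tc i j hi hj, if_neg hc]
            refine ⟨hv, ?_⟩
            simpa [hv] using memoOK_insert sc tc _ i j m2

theorem portB_eq (s t : String) :
    longest_palindrome_after_substring_concatenation_alt s t = fA s.toList t.toList 0 0 := by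
  unfold longest_palindrome_after_substring_concatenation_alt
  exact (goB_correct s.toList t.toList (s.toList.length + t.toList.length) 0 0
    PySem.Dict.empty (by omega) (by intro a b v hv; simp [PySem.Dict.get?_empty] at hv)).1

-- ===== VERDICT (by name: the statement is the Claim_ definition above) =====
theorem longest_palindrome_after_substring_concatenation_spec : Claim_equal_longest_palindrome_after_substring_concatenation := by
  intro s t _
  unfold Spec_longest_palindrome_after_substring_concatenation
  rw [portA_eq, portB_eq]
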